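-- pv_equiv track=rewrite | github.com/cirosantilli/project-euler-solutions | solvers/900.py | exact_S_up_to
-- ===== SOURCE A (Python) =====
-- def next_power_of_two_strictly_greater(x: int) -> int:
--     """
--     Return the smallest power of two strictly greater than x, for x >= 1.
--     Using bit_length:
--       - if x is a power of two, this returns 2*x
--       - otherwise it returns the next power of two above x
--     """
--     return 1 << x.bit_length()
--
-- def t(n: int) -> int:
--     """
--     Let p be the smallest power of 2 strictly greater than n.
--     Then the minimal k >= 0 that makes the special (n+1)-pile position losing is:
--         t(n) = (-n^2 - (n mod 2)) mod p
--     """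
--     p = next_power_of_two_strictly_greater(n)
--     return (-n * n - (n & 1)) % p
--
-- def exact_S_up_to(Nmax: int) -> list[int]:
--     """
--     Compute exact S(k) = sum_{n=1}^{2^k} t(n) for k = 0..Nmax (S(0)=0),
--     by direct summation using the closed form for t(n).
--     This is only used for small Nmax to seed/verify the recurrence.
--     """
--     if Nmax < 0:
--         raise ValueError("Nmax must be nonnegative")
--
--     S = [0] * (Nmax + 1)
--     if Nmax == 0:
--         return S
--
--     total = 0
--     next_cut = 2  # 2^1
--     k = 1
--     limit = 1 << Nmax
--     for n in range(1, limit + 1):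
--         total += t(n)
--         if n == next_cut:
--             S[k] = total
--             k += 1
--             next_cut <<= 1
--             if k > Nmax:
--                 break
--     return S
-- ===== SOURCE B (Python) =====
-- def exact_S_up_to(Nmax: int) -> list[int]:
--     """
--     Same values as A, computed per dyadic block with a fixed modulus.
--
--     For n in [2^(j-1), 2^j) the modulus p in t(n) is constantly 2^j, and
--     g(n) = (-n*n - (n & 1)) % 2^j has period 2^(j-1) in n (for j >= 2) and is
--     symmetric under n -> 2^(j-1) - n.  So the j-th block sum
--     sum_{n=2^(j-1)+1}^{2^j} t(n) (whose endpoints contribute 0) equals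
--     g(q) + 2 * sum_{n=1}^{q-1} g(n) with q = 2^(j-2): a quarter of the terms,
--     each with a fixed power-of-two modulus and no bit_length call.
--     """
--     if Nmax < 0:
--         raise ValueError("Nmax must be nonnegative")
--     S = [0] * (Nmax + 1)
--     total = 0
--     for j in range(2, Nmax + 1):
--         p = 1 << j
--         q = 1 << (j - 2)
--         c = (-q * q - (q & 1)) % p
--         for n in range(1, q):
--             c += 2 * ((-n * n - (n & 1)) % p)
--         total += c
--         S[j] = total
--     return S
-- ===== Notes on version B (the rewrite author's own statement) =====
-- stated objective: alternative
-- what changed: Instead of A's term-by-term scan of n up to 2^Nmax that recomputes the modulus from bit_length and watches for block cuts, B computes each dyadic block sum directly with its fixed power-of-two modulus over a quarter-length range, justified by the period and mirror symmetries of the summand, and prefix-accumulates the blocks.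
import Mathlib
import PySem

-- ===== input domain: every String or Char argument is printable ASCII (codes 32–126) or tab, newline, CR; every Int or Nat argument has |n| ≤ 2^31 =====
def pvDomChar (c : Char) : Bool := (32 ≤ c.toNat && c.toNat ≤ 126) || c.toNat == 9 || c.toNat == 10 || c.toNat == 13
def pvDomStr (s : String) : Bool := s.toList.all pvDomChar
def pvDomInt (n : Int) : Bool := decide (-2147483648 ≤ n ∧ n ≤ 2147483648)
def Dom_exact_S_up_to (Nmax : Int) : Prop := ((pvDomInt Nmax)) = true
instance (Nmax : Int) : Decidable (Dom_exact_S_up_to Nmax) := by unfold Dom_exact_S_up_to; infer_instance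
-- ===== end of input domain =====

-- B replaces A's scan of n = 1..2^Nmax (recomputing the modulus from bit_length and watching
-- for block cuts) by per-block sums with the fixed modulus 2^j over the quarter range
-- [1, 2^(j-2)), justified by the period and mirror symmetries of (-n^2-(n&1)) mod 2^j.

-- ===== PORT A =====

-- 1 << x.bit_length()
def pvNextPow2SG (x : Int) : Int := ((1 <<< PySem.Int.bitLength x : Nat) : Int)

-- t(n) = (-n*n - (n & 1)) % p
def pvT (n : Int) : Int :=
  let p := pvNextPow2SG n
  PySem.Int.mod (-n * n - PySem.Int.band n 1) p

-- A's 'for n in range(1, limit+1)' loop with its break; 'S[k] = total' is List.set k.toNat: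
-- exact here because k stays in [1, Nmax] (the break fires before k can leave the range).
def pvLoopA (Nmax : Int) : List Int → List Int → Int → Int → Int → List Int
  | [], S, _, _, _ => S
  | n :: rest, S, total, next_cut, k =>
    let total' := total + pvT n
    if n = next_cut then
      let S' := S.set k.toNat total'
      let k' := k + 1
      let next_cut' := next_cut <<< (1 : Nat)
      if Nmax < k' then S'
      else pvLoopA Nmax rest S' total' next_cut' k'
    else pvLoopA Nmax rest S total' next_cut k

def exact_S_up_to (Nmax : Int) : List Int :=
  if Nmax < 0 then []   -- Python raises ValueError here; excluded by Pre_
  else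
    let S := List.replicate (Nmax + 1).toNat 0
    if Nmax = 0 then S
    else
      let limit : Int := ((1 <<< Nmax.toNat : Nat) : Int)
      pvLoopA Nmax (PySem.List.pyRange 1 (limit + 1)) S 0 2 1

-- ===== PORT B =====

-- the body of B's outer 'for j in range(2, Nmax+1)' loop: one dyadic block
def pvStepB (st : List Int × Int) (j : Int) : List Int × Int :=
  let p : Int := ((1 <<< j.toNat : Nat) : Int)          -- j ≥ 2 in the range
  let q : Int := ((1 <<< (j - 2).toNat : Nat) : Int)
  let c0 := PySem.Int.mod (-q * q - PySem.Int.band q 1) p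
  let c := (PySem.List.pyRange 1 q).foldl
    (fun c n => c + 2 * PySem.Int.mod (-n * n - PySem.Int.band n 1) p) c0
  let total := st.2 + c
  (st.1.set j.toNat total, total)

def exact_S_up_to_alt (Nmax : Int) : List Int :=
  if Nmax < 0 then []   -- Python raises ValueError here; excluded by Pre_
  else
    let S0 := List.replicate (Nmax + 1).toNat 0
    ((PySem.List.pyRange 2 (Nmax + 1)).foldl pvStepB (S0, 0)).1

-- ===== PRECONDITION & SPEC =====
-- Python A raises ValueError exactly when Nmax < 0.
def Pre_exact_S_up_to (Nmax : Int) : Prop := 0 ≤ Nmax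
instance (Nmax : Int) : Decidable (Pre_exact_S_up_to Nmax) := by unfold Pre_exact_S_up_to; infer_instance
def pvWitness_exact_S_up_to : Int := (3)

def Spec_exact_S_up_to (Nmax : Int) (out : List Int) : Prop := out = exact_S_up_to_alt Nmax
instance (Nmax : Int) (out : List Int) : Decidable (Spec_exact_S_up_to Nmax out) := by unfold Spec_exact_S_up_to; infer_instance

-- ===== CLAIM (what is proved, stated in full; the proofs are below) =====
def Claim_equal_exact_S_up_to : Prop := ∀ (Nmax : Int), Dom_exact_S_up_to Nmax → Pre_exact_S_up_to Nmax → Spec_exact_S_up_to Nmax (exact_S_up_to Nmax)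

-- ===== LEMMAS AND PROOFS =====

-- the summand with the fixed modulus 2^j (B's expression after `n & 1 = n % 2`)
def pvG (j : Nat) (n : Int) : Int :=
  PySem.Int.mod (-n * n - PySem.Int.mod n 2) (((2 ^ j : Nat) : Int))

-- sum_{n=1}^{N} t(n)
def pvTsum (N : Nat) : Int := ∑ n ∈ (Finset.Ico 1 (N + 1) : Finset Nat), pvT (n : Int)

-- the common shape of both results: S[k] = Tsum(2^k) for k = 0..N
def pvSpecList (N : Nat) : List Int := (List.range (N + 1)).map (fun k => pvTsum (2 ^ k))

-- B's per-block value
def pvCB (M : Nat) : Int :=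
  pvG M (((2 ^ (M - 2) : Nat) : Int)) + 2 * ∑ n ∈ (Finset.Ico 1 (2 ^ (M - 2)) : Finset Nat), pvG M (n : Int)

-- write Tsum(2^j) into slots k..N
def pvFill (S : List Int) (k N : Nat) : List Int :=
  if k ≤ N then pvFill (S.set k (pvTsum (2 ^ k))) (k + 1) N else S
  termination_by N + 1 - k

lemma pvFill_of_le {k N : Nat} (S : List Int) (h : k ≤ N) :
    pvFill S k N = pvFill (S.set k (pvTsum (2 ^ k))) (k + 1) N := by
  rw [pvFill]; simp [h]

lemma pvFill_of_gt {k N : Nat} (S : List Int) (h : N < k) : pvFill S k N = S := by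
  rw [pvFill]; simp [Nat.not_le.mpr h]

lemma pvBitLen {j : Nat} {n : Int} (hj : 1 ≤ j) (h1 : ((2^(j-1) : Nat) : Int) ≤ n) (h2 : n < ((2^j : Nat) : Int)) :
    PySem.Int.bitLength n = j := by
  have hn : 0 < n := lt_of_lt_of_le (by exact_mod_cast Nat.two_pow_pos (j-1)) h1
  have h3 : n.natAbs < 2 ^ PySem.Int.bitLength n := PySem.Int.lt_two_pow_bitLength n
  have h4 : 2 ^ (PySem.Int.bitLength n - 1) ≤ n.natAbs :=
    PySem.Int.two_pow_bitLength_le n (by omega)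
  have habs : (n.natAbs : Int) = n := Int.natAbs_of_nonneg hn.le
  have h1' : 2 ^ (j-1) ≤ n.natAbs := by
    have : ((2 ^ (j-1) : Nat) : Int) ≤ (n.natAbs : Int) := by rw [habs]; exact h1
    exact_mod_cast this
  have h2' : n.natAbs < 2 ^ j := by
    have : (n.natAbs : Int) < ((2 ^ j : Nat) : Int) := by rw [habs]; exact h2
    exact_mod_cast this
  have hjb : j ≤ PySem.Int.bitLength n := by
    by_contra h
    have hle : PySem.Int.bitLength n ≤ j - 1 := by omega
    have := Nat.pow_le_pow_right (by norm_num : 1 ≤ 2) hle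
    omega
  have hbj : PySem.Int.bitLength n ≤ j := by
    by_contra h
    have hle : j ≤ PySem.Int.bitLength n - 1 := by omega
    have := Nat.pow_le_pow_right (by norm_num : 1 ≤ 2) hle
    omega
  omega

lemma pvT_block {j : Nat} {n : Int} (hj : 1 ≤ j) (h1 : ((2^(j-1) : Nat) : Int) ≤ n) (h2 : n < ((2^j : Nat) : Int)) :
    pvT n = pvG j n := by
  unfold pvT pvG pvNextPow2SG
  rw [pvBitLen hj h1 h2, Nat.one_shiftLeft, PySem.Int.band_one]

lemma pvT_pow {j : Nat} (hj : 1 ≤ j) : pvT (((2^j : Nat) : Int)) = 0 := by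
  have hb : PySem.Int.bitLength (((2^j : Nat) : Int)) = j + 1 := by
    apply pvBitLen (by omega)
    · show ((2^((j+1)-1) : Nat) : Int) ≤ ((2^j : Nat) : Int)
      norm_num
    · exact_mod_cast Nat.pow_lt_pow_right (by norm_num : 1 < 2) (Nat.lt_succ_self j)
  unfold pvT pvNextPow2SG
  rw [hb, Nat.one_shiftLeft, PySem.Int.band_one]
  have h2 : PySem.Int.mod (((2^j : Nat) : Int)) 2 = 0 := by
    rw [PySem.Int.mod_eq_zero_iff_dvd]
    exact_mod_cast dvd_pow_self 2 (by omega : j ≠ 0)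
  rw [h2, PySem.Int.mod_eq_zero_iff_dvd]
  have he : (-((2^j : Nat) : Int) * ((2^j : Nat) : Int) - 0) = -(((2^(j+j) : Nat) : Int)) := by
    push_cast
    rw [pow_add]
    ring
  rw [he]
  apply dvd_neg.mpr
  exact_mod_cast pow_dvd_pow 2 (by omega : j + 1 ≤ j + j)

lemma pvG_emod (j : Nat) (n : Int) : pvG j n = (-n * n - n % 2) % (2:Int)^j := by
  unfold pvG
  rw [PySem.Int.mod_eq_emod_of_pos (by exact_mod_cast Nat.two_pow_pos j),
      PySem.Int.mod_eq_emod_of_pos (by norm_num : (0:Int) < 2)]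
  norm_num

lemma pvG_zero (j : Nat) : pvG j 0 = 0 := by
  rw [pvG_emod]; norm_num

lemma pvG_period (i : Nat) (n : Int) : pvG (i+2) (n + 2^(i+1)) = pvG (i+2) n := by
  rw [pvG_emod, pvG_emod]
  have h1 : (n + (2:Int)^(i+1)) % 2 = n % 2 := by
    rw [show ((2:Int)^(i+1)) = 2 * 2^i by ring, Int.add_mul_emod_self_left]
  rw [h1]
  have h2 : -(n + (2:Int)^(i+1)) * (n + 2^(i+1)) - n % 2
      = (-n * n - n % 2) + 2^(i+2) * (-n - 2^i) := by ring
  rw [h2, Int.add_mul_emod_self_left]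

lemma pvG_mirror (i : Nat) (n : Int) : pvG (i+2) (2^(i+1) - n) = pvG (i+2) n := by
  rw [pvG_emod, pvG_emod]
  have h1 : ((2:Int)^(i+1) - n) % 2 = n % 2 := by
    rw [show (2:Int)^(i+1) - n = -n + 2 * 2^i by ring, Int.add_mul_emod_self_left,
        Int.neg_emod_two]
  rw [h1]
  have h2 : -((2:Int)^(i+1) - n) * (2^(i+1) - n) - n % 2
      = (-n * n - n % 2) + 2^(i+2) * (n - 2^i) := by ring
  rw [h2, Int.add_mul_emod_self_left]

-- sum over a pyRange equals the Finset sum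
lemma pvRangeSumAux (f : Int → Int) :
    ∀ (d a : Nat), ((PySem.List.pyRange (a : Int) ((a + d : Nat) : Int)).map f).sum
      = ∑ n ∈ Finset.Ico a (a + d), f (n : Int) := by
  intro d
  induction d with
  | zero =>
    intro a
    simp [PySem.List.pyRange]
  | succ d ih =>
    intro a
    have hsplit : PySem.List.pyRange (a : Int) ((a + (d+1) : Nat) : Int)
        = PySem.List.pyRange (a : Int) ((a + d : Nat) : Int) ++ [((a + d : Nat) : Int)] := by
      have h : ((a + (d+1) : Nat) : Int) = ((a + d : Nat) : Int) + 1 := by push_cast; ring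
      rw [h]
      exact PySem.List.pyRange_one_succ_right (by push_cast; omega)
    rw [hsplit, List.map_append, List.sum_append, ih a]
    rw [show a + (d + 1) = (a + d) + 1 by omega,
        Finset.sum_Ico_succ_top (by omega) (fun n : Nat => f (n : Int))]
    simp

lemma pvRangeSum (f : Int → Int) (a b : Nat) (hab : a ≤ b) :
    ((PySem.List.pyRange (a : Int) (b : Int)).map f).sum = ∑ n ∈ Finset.Ico a b, f (n : Int) := by
  obtain ⟨d, rfl⟩ := Nat.le.dest hab
  exact pvRangeSumAux f d a

lemma pvRangeSum1 (f : Int → Int) (b : Nat) :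
    ((PySem.List.pyRange 1 ((b : Nat) : Int)).map f).sum = ∑ n ∈ Finset.Ico 1 b, f (n : Int) := by
  rcases Nat.lt_or_ge b 1 with hb | hb
  · interval_cases b
    simp [PySem.List.pyRange]
  · have := pvRangeSum f 1 b hb
    norm_num at this
    exact this

-- reflection: sum over [1, 2q) of a mirror-symmetric f
lemma pvReflect (f : Nat → Int) (q : Nat) (hq : 1 ≤ q)
    (hf : ∀ n, 1 ≤ n → n < 2*q → f (2*q - n) = f n) :
    ∑ n ∈ Finset.Ico 1 (2*q), f n = f q + 2 * ∑ n ∈ Finset.Ico 1 q, f n := by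
  have h1 : ∑ n ∈ Finset.Ico 1 (q+1), f n + ∑ n ∈ Finset.Ico (q+1) (2*q), f n
      = ∑ n ∈ Finset.Ico 1 (2*q), f n :=
    Finset.sum_Ico_consecutive f (by omega) (by omega)
  have h2 : ∑ n ∈ Finset.Ico 1 (q+1), f n = ∑ n ∈ Finset.Ico 1 q, f n + f q :=
    Finset.sum_Ico_succ_top (by omega) f
  have h3 : ∑ n ∈ Finset.Ico (q+1) (2*q), f n = ∑ i ∈ Finset.range (q-1), f (q+1+i) := by
    rw [Finset.sum_Ico_eq_sum_range, show 2*q - (q+1) = q - 1 by omega]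
  have h4 : ∑ n ∈ Finset.Ico 1 q, f n = ∑ i ∈ Finset.range (q-1), f (1+i) := by
    rw [Finset.sum_Ico_eq_sum_range]
  have h5 : ∑ i ∈ Finset.range (q-1), f (q+1+i)
      = ∑ i ∈ Finset.range (q-1), (fun i => f (1+i)) (q - 1 - 1 - i) := by
    apply Finset.sum_congr rfl
    intro i hi
    have hi' : i < q - 1 := Finset.mem_range.mp hi
    have hm := hf (q+1+i) (by omega) (by omega)
    have e : 2*q - (q+1+i) = 1 + (q - 1 - 1 - i) := by omega
    rw [e] at hm
    exact hm.symm
  have h6 : ∑ i ∈ Finset.range (q-1), (fun i => f (1+i)) (q - 1 - 1 - i)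
      = ∑ i ∈ Finset.range (q-1), f (1+i) := Finset.sum_range_reflect (fun i => f (1+i)) (q-1)
  omega

-- the block identity: sum of t over the j-th block = B's closed per-block sum
lemma pvBlock (M : Nat) (hM : 2 ≤ M) :
    (∑ n ∈ (Finset.Ico (2^(M-1)+1) (2^M+1) : Finset Nat), pvT (n : Int)) = pvCB M := by
  obtain ⟨i, rfl⟩ : ∃ i, M = i + 2 := ⟨M - 2, by omega⟩
  show (∑ n ∈ (Finset.Ico (2^(i+1)+1) (2^(i+2)+1) : Finset Nat), pvT (n : Int))
      = pvG (i+2) (((2^i : Nat) : Int)) + 2 * ∑ n ∈ (Finset.Ico 1 (2^i) : Finset Nat), pvG (i+2) (n : Int)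
  have hq : 1 ≤ (2:Nat)^i := Nat.one_le_two_pow
  have hA : (2:Nat)^(i+1) = 2*2^i := by rw [pow_succ]; ring
  have hB : (2:Nat)^(i+2) = 4*2^i := by rw [pow_succ, pow_succ]; ring
  rw [hA, hB]
  set f : Nat → Int := fun n => pvT (n : Int) with hf
  set g : Nat → Int := fun n => pvG (i+2) (n : Int) with hg
  have e1 : ∑ n ∈ Finset.Ico (2*2^i) (2*2^i+1), f n + ∑ n ∈ Finset.Ico (2*2^i+1) (4*2^i+1), f n
      = ∑ n ∈ Finset.Ico (2*2^i) (4*2^i+1), f n :=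
    Finset.sum_Ico_consecutive f (by omega) (by omega)
  have e2 : ∑ n ∈ Finset.Ico (2*2^i) (2*2^i+1), f n = f (2*2^i) := by
    rw [Finset.sum_Ico_succ_top (le_refl _) f, Finset.Ico_self, Finset.sum_empty, zero_add]
  have e3 : f (2*2^i) = 0 := by
    show pvT ((2*2^i : Nat) : Int) = 0
    rw [show (2*2^i : Nat) = 2^(i+1) by rw [pow_succ]; ring]
    exact pvT_pow (by omega)
  have e4 : ∑ n ∈ Finset.Ico (2*2^i) (4*2^i+1), f n
      = ∑ n ∈ Finset.Ico (2*2^i) (4*2^i), f n + f (4*2^i) :=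
    Finset.sum_Ico_succ_top (by omega) f
  have e5 : f (4*2^i) = 0 := by
    show pvT ((4*2^i : Nat) : Int) = 0
    rw [show (4*2^i : Nat) = 2^(i+2) by rw [pow_succ, pow_succ]; ring]
    exact pvT_pow (by omega)
  have e6 : ∑ n ∈ Finset.Ico (2*2^i) (4*2^i), f n = ∑ n ∈ Finset.Ico (2*2^i) (4*2^i), g n := by
    apply Finset.sum_congr rfl
    intro n hn
    rw [Finset.mem_Ico] at hn
    show pvT (n : Int) = pvG (i+2) (n : Int)
    apply pvT_block (by omega : 1 ≤ i+2)
    · show ((2^((i+2)-1) : Nat) : Int) ≤ (n : Int)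
      have : (2:Nat)^((i+2)-1) = 2*2^i := by rw [show (i+2)-1 = i+1 by omega, pow_succ]; ring
      rw [this]
      exact_mod_cast hn.1
    · have : (2:Nat)^(i+2) = 4*2^i := by rw [pow_succ, pow_succ]; ring
      rw [this]
      exact_mod_cast hn.2
  have e7 : ∑ n ∈ Finset.Ico (2*2^i) (4*2^i), g n = ∑ n ∈ Finset.Ico 0 (2*2^i), g n := by
    rw [Finset.sum_Ico_eq_sum_range, Finset.sum_Ico_eq_sum_range]
    rw [show 4*2^i - 2*2^i = 2*2^i by omega, show 2*2^i - 0 = 2*2^i by omega]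
    apply Finset.sum_congr rfl
    intro k _
    show g (2*2^i + k) = g (0 + k)
    show pvG (i+2) ((2*2^i + k : Nat) : Int) = pvG (i+2) ((0 + k : Nat) : Int)
    have hc : ((2*2^i + k : Nat) : Int) = ((0 + k : Nat) : Int) + 2^(i+1) := by push_cast; ring
    rw [hc, pvG_period i]
  have e8 : ∑ n ∈ Finset.Ico 0 1, g n + ∑ n ∈ Finset.Ico 1 (2*2^i), g n
      = ∑ n ∈ Finset.Ico 0 (2*2^i), g n :=
    Finset.sum_Ico_consecutive g (by omega) (by omega)
  have e9 : ∑ n ∈ Finset.Ico 0 1, g n = 0 := by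
    rw [Finset.sum_Ico_succ_top (le_refl _) g, Finset.Ico_self, Finset.sum_empty, zero_add]
    show pvG (i+2) ((0 : Nat) : Int) = 0
    exact_mod_cast pvG_zero (i+2)
  have e10 : ∑ n ∈ Finset.Ico 1 (2*2^i), g n = g (2^i) + 2 * ∑ n ∈ Finset.Ico 1 (2^i), g n := by
    apply pvReflect g (2^i) hq
    intro n h1n h2n
    show pvG (i+2) ((2*2^i - n : Nat) : Int) = pvG (i+2) (n : Int)
    have hc : ((2*2^i - n : Nat) : Int) = 2^(i+1) - (n : Int) := by
      push_cast [Nat.cast_sub (by omega : n ≤ 2*2^i)]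
      ring
    rw [hc, pvG_mirror i]
  have e11 : g (2^i) = pvG (i+2) (((2^i : Nat) : Int)) := rfl
  linarith [e1, e2, e3, e4, e5, e6, e7, e8, e9, e10, e11]

lemma pvTsum_split (k : Nat) (hk : 1 ≤ k) :
    pvTsum (2^k) = pvTsum (2^(k-1)) + ∑ n ∈ (Finset.Ico (2^(k-1)+1) (2^k+1) : Finset Nat), pvT (n : Int) := by
  unfold pvTsum
  refine (Finset.sum_Ico_consecutive (fun n : Nat => pvT (n : Int)) ?_ ?_).symm
  · exact Nat.le_add_left 1 _
  · exact Nat.succ_le_succ (Nat.pow_le_pow_right (by norm_num : 1 ≤ 2) (by omega : k - 1 ≤ k))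

lemma pvCB_total (M : Nat) (hM : 2 ≤ M) : pvTsum (2^(M-1)) + pvCB M = pvTsum (2^M) := by
  rw [pvTsum_split M (by omega), pvBlock M hM]

lemma pvTsum_one : pvTsum 1 = 0 := by decide
lemma pvTsum_two : pvTsum 2 = 0 := by decide

-- A's loop: the total accumulated across one block is exactly Tsum of the cut
lemma pvStepTotal (k : Nat) (hk : 1 ≤ k) :
    pvTsum (2^(k-1))
      + ((PySem.List.pyRange (((2^(k-1) : Nat) : Int) + 1) (((2^k : Nat) : Int))).map pvT).sum
      + pvT (((2^k : Nat) : Int)) = pvTsum (2^k) := by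
  have hlt : (2:Nat)^(k-1) < 2^k := Nat.pow_lt_pow_right (by norm_num : 1 < 2) (by omega)
  rw [show ((2^(k-1) : Nat) : Int) + 1 = ((2^(k-1)+1 : Nat) : Int) by push_cast; ring]
  rw [pvRangeSum pvT (2^(k-1)+1) (2^k) (by omega)]
  rw [pvTsum_split k hk]
  rw [Finset.sum_Ico_succ_top (show 2^(k-1)+1 ≤ 2^k by omega) (fun n : Nat => pvT (n : Int))]
  ring

lemma pvLoopA_cons (Nmax n : Int) (rest S : List Int) (total nc k : Int) :
    pvLoopA Nmax (n :: rest) S total nc k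
      = if n = nc then
          (if Nmax < k + 1 then S.set k.toNat (total + pvT n)
           else pvLoopA Nmax rest (S.set k.toNat (total + pvT n)) (total + pvT n) (nc <<< (1:Nat)) (k+1))
        else pvLoopA Nmax rest S (total + pvT n) nc k := rfl

-- running A's loop through elements that never hit the cut just accumulates their t-values
lemma pvLoopA_nocut (Nmax : Int) (ns : List Int) :
    ∀ (rest S : List Int) (total nc k : Int), (∀ n ∈ ns, n ≠ nc) →
    pvLoopA Nmax (ns ++ rest) S total nc k
      = pvLoopA Nmax rest S (total + (ns.map pvT).sum) nc k := by
  induction ns with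
  | nil => intro rest S total nc k _; simp
  | cons n t ih =>
    intro rest S total nc k h
    have hn : n ≠ nc := h n (by simp)
    rw [List.cons_append, pvLoopA_cons, if_neg hn, ih rest S (total + pvT n) nc k
      (fun m hm => h m (by simp [hm]))]
    rw [List.map_cons, List.sum_cons, add_assoc]

lemma pvLoopA_main (N : Nat) (hN : 1 ≤ N) :
    ∀ (d k : Nat) (S : List Int), 1 ≤ k → k + d = N →
    pvLoopA (N : Int)
        (PySem.List.pyRange (((2^(k-1) : Nat) : Int) + 1) (((2^N : Nat) : Int) + 1))
        S (pvTsum (2^(k-1))) (((2^k : Nat) : Int)) (k : Int)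
      = pvFill S k N := by
  intro d
  induction d with
  | zero =>
    intro k S hk hkd
    have hkN : k = N := by omega
    subst hkN
    have hlt : (2:Nat)^(k-1) < 2^k := Nat.pow_lt_pow_right (by norm_num : 1 < 2) (by omega)
    have hsplit : PySem.List.pyRange (((2^(k-1) : Nat) : Int) + 1) (((2^k : Nat) : Int) + 1)
        = PySem.List.pyRange (((2^(k-1) : Nat) : Int) + 1) (((2^k : Nat) : Int))
          ++ [((2^k : Nat) : Int)] :=
      PySem.List.pyRange_one_succ_right (by exact_mod_cast hlt)
    rw [hsplit, pvLoopA_nocut _ _ _ _ _ _ _ (by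
      intro n hn
      rw [PySem.List.mem_pyRange_one] at hn
      omega)]
    rw [pvLoopA_cons, if_pos rfl, if_pos (by omega : (k : Int) < (k : Int) + 1)]
    rw [Int.toNat_natCast, pvStepTotal k hk]
    rw [pvFill_of_le S (le_refl k), pvFill_of_gt _ (by omega)]
  | succ d ih =>
    intro k S hk hkd
    have hkN : k < N := by omega
    have hlt : (2:Nat)^(k-1) < 2^k := Nat.pow_lt_pow_right (by norm_num : 1 < 2) (by omega)
    have hkk : (2:Nat)^k ≤ 2^N := Nat.pow_le_pow_right (by norm_num : 1 ≤ 2) (by omega)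
    have hsplit : PySem.List.pyRange (((2^(k-1) : Nat) : Int) + 1) (((2^N : Nat) : Int) + 1)
        = PySem.List.pyRange (((2^(k-1) : Nat) : Int) + 1) (((2^k : Nat) : Int))
          ++ (((2^k : Nat) : Int) :: PySem.List.pyRange (((2^k : Nat) : Int) + 1) (((2^N : Nat) : Int) + 1)) := by
      rw [← PySem.List.pyRange_one_cons (by exact_mod_cast (by omega : (2:Nat)^k < 2^N + 1))]
      exact PySem.List.pyRange_one_append _ _ _ (by exact_mod_cast hlt)
        (by exact_mod_cast (by omega : (2:Nat)^k ≤ 2^N + 1))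
    rw [hsplit, pvLoopA_nocut _ _ _ _ _ _ _ (by
      intro n hn
      rw [PySem.List.mem_pyRange_one] at hn
      omega)]
    rw [pvLoopA_cons, if_pos rfl, if_neg (by omega : ¬ ((N : Int) < (k : Int) + 1))]
    rw [Int.toNat_natCast, pvStepTotal k hk]
    have hshift : ((2^k : Nat) : Int) <<< (1:Nat) = ((2^(k+1) : Nat) : Int) := by
      rw [Int.shiftLeft_eq]; push_cast; ring
    have hk1 : (k : Int) + 1 = ((k+1 : Nat) : Int) := by push_cast; ring
    rw [hshift, hk1]
    have hih := ih (k+1) (S.set k (pvTsum (2^k))) (by omega) (by omega)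
    simp only [Nat.add_sub_cancel] at hih
    rw [hih, pvFill_of_le S (by omega : k ≤ N)]

lemma pvFill_eq (N : Nat) :
    ∀ (d k : Nat) (S : List Int), S.length = N + 1 → k + d = N + 1 →
    pvFill S k N = S.take k ++ (List.range (N + 1 - k)).map (fun i => pvTsum (2 ^ (k + i))) := by
  intro d
  induction d with
  | zero =>
    intro k S hlen hkd
    have hk : k = N + 1 := by omega
    subst hk
    rw [pvFill_of_gt _ (by omega)]
    rw [List.take_of_length_le (by omega : S.length ≤ N + 1)]
    simp
  | succ d ih =>
    intro k S hlen hkd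
    have hk : k ≤ N := by omega
    rw [pvFill_of_le _ hk, ih (k+1) _ (by simp [hlen]) (by omega)]
    have h1 : (S.set k (pvTsum (2^k))).take (k+1) = S.take k ++ [pvTsum (2^k)] := by
      have hkl : k < (S.set k (pvTsum (2^k))).length := by simp [hlen]; omega
      rw [← List.take_concat_get hkl, List.getElem_set_self, List.concat_eq_append]
      congr 1
      rw [List.take_set]
      apply List.set_eq_of_length_le
      simp [hlen]
    rw [h1]
    have h2 : (List.range (N + 1 - k)).map (fun i => pvTsum (2 ^ (k + i)))
        = pvTsum (2^k) :: (List.range (N + 1 - (k+1))).map (fun i => pvTsum (2 ^ (k + 1 + i))) := by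
      rw [show N + 1 - k = (N + 1 - (k+1)) + 1 by omega, List.range_succ_eq_map]
      simp only [List.map_cons, List.map_map]
      refine congrArg₂ List.cons (by norm_num) (List.map_congr_left ?_)
      intro i _
      simp only [Function.comp_apply]
      congr 1
      congr 1; omega
    rw [h2]
    simp [List.append_assoc]

lemma pvFill_succ_top (N : Nat) :
    ∀ (d k : Nat) (S : List Int), k + d = N + 2 → k ≤ N + 1 →
    (pvFill S k N).set (N+1) (pvTsum (2^(N+1))) = pvFill S k (N+1) := by
  intro d
  induction d with
  | zero => intro k S hkd hk; omega
  | succ d ih =>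
    intro k S hkd hk
    by_cases hcase : k = N + 1
    · subst hcase
      rw [pvFill_of_gt _ (by omega), pvFill_of_le _ (le_refl _), pvFill_of_gt _ (by omega)]
    · have hkN : k ≤ N := by omega
      rw [pvFill_of_le _ hkN, pvFill_of_le _ (by omega : k ≤ N + 1)]
      exact ih (k+1) _ (by omega) (by omega)

lemma pvA_spec (N : Nat) : exact_S_up_to (N : Int) = pvSpecList N := by
  rcases Nat.eq_zero_or_pos N with h0 | hN
  · subst h0; decide
  · unfold exact_S_up_to
    rw [if_neg (by omega : ¬ ((N : Int) < 0))]
    show (if (N : Int) = 0 then List.replicate ((N : Int) + 1).toNat 0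
          else pvLoopA (N : Int)
            (PySem.List.pyRange 1 (((1 <<< (N : Int).toNat : Nat) : Int) + 1))
            (List.replicate ((N : Int) + 1).toNat 0) 0 2 1) = pvSpecList N
    rw [if_neg (by omega : ¬ ((N : Int) = 0))]
    rw [show ((N : Int) + 1).toNat = N + 1 by omega]
    rw [Int.toNat_natCast, Nat.one_shiftLeft]
    have hfirst : PySem.List.pyRange 1 (((2^N : Nat) : Int) + 1)
        = 1 :: PySem.List.pyRange 2 (((2^N : Nat) : Int) + 1) := by
      apply PySem.List.pyRange_one_cons
      have h := Nat.one_le_two_pow (n := N)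
      omega
    rw [hfirst, pvLoopA_cons, if_neg (by norm_num : ¬ ((1:Int) = 2))]
    rw [show ((0:Int) + pvT 1) = pvTsum (2^(1-1)) by decide]
    have hmain := pvLoopA_main N hN (N - 1) 1 (List.replicate (N+1) 0) (le_refl 1) (by omega)
    have hgoal : pvLoopA (N : Int) (PySem.List.pyRange 2 (((2^N : Nat) : Int) + 1))
        (List.replicate (N+1) 0) (pvTsum (2^(1-1))) 2 1
        = pvFill (List.replicate (N+1) 0) 1 N := by
      rw [← hmain]; norm_num
    rw [hgoal]
    rw [pvFill_eq N N 1 _ (by simp) (by omega)]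
    unfold pvSpecList
    rw [List.range_succ_eq_map, List.map_cons, List.map_map]
    rw [show (List.replicate (N+1) (0:Int)).take 1 = [0] by
      rw [List.take_replicate, show min 1 (N+1) = 1 by omega]; rfl]
    rw [show pvTsum (2^0) = 0 from pvTsum_one]
    show (0 : Int) :: (List.range (N + 1 - 1)).map (fun i => pvTsum (2 ^ (1 + i)))
        = 0 :: (List.range N).map ((fun k => pvTsum (2 ^ k)) ∘ Nat.succ)
    rw [show N + 1 - 1 = N by omega]
    congr 1
    apply List.map_congr_left
    intro i _
    simp only [Function.comp_apply]
    congr 1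
    congr 1; omega

-- one application of B's loop body, at j = M ≥ 2
lemma pvStepB_eq (M : Nat) (S : List Int) (t : Int) :
    pvStepB (S, t) ((M : Nat) : Int) = (S.set M (t + pvCB M), t + pvCB M) := by
  simp only [pvStepB, Nat.one_shiftLeft, PySem.Int.band_one,
    show ((M : Int) - 2).toNat = M - 2 by omega, Int.toNat_natCast]
  rw [PySem.List.foldl_add]
  rw [pvRangeSum1 (fun n => 2 * PySem.Int.mod (-n * n - PySem.Int.mod n 2) (((2^M : Nat) : Int))) (2^(M-2))]
  rw [← Finset.mul_sum]
  rfl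

lemma pvFoldB (S0 : List Int) (m : Nat) (hm : 2 ≤ m) :
    (PySem.List.pyRange 2 ((m : Nat) : Int)).foldl pvStepB (S0, 0)
      = (pvFill S0 2 (m - 1), pvTsum (2^(m-1))) := by
  obtain ⟨d, rfl⟩ : ∃ d, m = d + 2 := ⟨m - 2, by omega⟩
  clear hm
  induction d with
  | zero =>
    rw [show (((0:Nat) + 2 : Nat) : Int) = (2 : Int) by norm_num]
    rw [show PySem.List.pyRange 2 2 = [] by simp [PySem.List.pyRange]]
    rw [pvFill_of_gt _ (by omega)]
    rw [show ((0:Nat) + 2 - 1) = 1 by omega]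
    rw [show pvTsum (2^1) = 0 from pvTsum_two]
    rfl
  | succ d ih =>
    have hsplit : PySem.List.pyRange 2 (((d + 1 + 2 : Nat)) : Int)
        = PySem.List.pyRange 2 (((d + 2 : Nat)) : Int) ++ [((d + 2 : Nat) : Int)] := by
      rw [show (((d + 1 + 2 : Nat)) : Int) = ((d + 2 : Nat) : Int) + 1 by push_cast; ring]
      exact PySem.List.pyRange_one_succ_right (by push_cast; omega)
    rw [hsplit, List.foldl_append, ih]
    rw [List.foldl_cons, List.foldl_nil]
    rw [pvStepB_eq (d + 2) _ _]
    have ht := pvCB_total (d+2) (by omega)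
    rw [show (d + 2 - 1 : Nat) = d + 1 by omega] at ht ⊢
    rw [ht]
    have hfill := pvFill_succ_top (d+1) (d+1) 2 S0 (by omega) (by omega)
    rw [show ((d + 1) + 1 : Nat) = d + 2 by omega] at hfill
    rw [show (d + 1 + 2 - 1 : Nat) = d + 2 by omega]
    rw [hfill]

lemma pvB_spec (N : Nat) : exact_S_up_to_alt (N : Int) = pvSpecList N := by
  rcases Nat.lt_or_ge N 2 with hN | hN
  · match N, hN with
    | 0, _ => decide
    | 1, _ => decide
  · obtain ⟨R, rfl⟩ : ∃ R, N = R + 2 := ⟨N - 2, by omega⟩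
    unfold exact_S_up_to_alt
    rw [if_neg (by omega : ¬ (((R + 2 : Nat) : Int) < 0))]
    show ((PySem.List.pyRange 2 (((R + 2 : Nat) : Int) + 1)).foldl pvStepB
        (List.replicate (((R + 2 : Nat) : Int) + 1).toNat 0, 0)).1 = pvSpecList (R + 2)
    rw [show (((R + 2 : Nat) : Int) + 1).toNat = R + 2 + 1 by omega]
    rw [show (((R + 2 : Nat) : Int) + 1) = ((R + 2 + 1 : Nat) : Int) by push_cast; ring]
    rw [pvFoldB (List.replicate (R + 2 + 1) 0) (R + 2 + 1) (by omega)]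
    rw [show (R + 2 + 1 - 1 : Nat) = R + 2 by omega]
    rw [pvFill_eq (R + 2) (R + 1) 2 _ (by simp) (by omega)]
    rw [show (List.replicate (R + 2 + 1) (0:Int)).take 2 = [0, 0] by
      rw [List.take_replicate, show min 2 (R + 2 + 1) = 2 by omega]; rfl]
    rw [show (R + 2 + 1 - 2 : Nat) = R + 1 by omega]
    have hspec : pvSpecList (R + 2)
        = (0 : Int) :: 0 :: (List.range (R + 1)).map (fun i => pvTsum (2 ^ (2 + i))) := by
      unfold pvSpecList
      rw [show (R + 2 + 1 : Nat) = ((R + 1) + 1) + 1 by omega,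
          List.range_succ_eq_map, List.range_succ_eq_map]
      simp only [List.map_cons, List.map_map]
      rw [show pvTsum (2^0) = 0 from pvTsum_one]
      rw [show pvTsum (2 ^ Nat.succ 0) = 0 from pvTsum_two]
      congr 1
      congr 1
      apply List.map_congr_left
      intro i _
      simp only [Function.comp_apply]
      congr 1
      congr 1; omega
    rw [hspec]
    rfl

-- ===== VERDICT (by name: the statement is the Claim_ definition above) =====
theorem exact_S_up_to_spec : Claim_equal_exact_S_up_to := by
  intro Nmax _ hPre
  unfold Spec_exact_S_up_to
  obtain ⟨N, rfl⟩ : ∃ N : Nat, Nmax = (N : Int) := ⟨Nmax.toNat, (Int.toNat_of_nonneg hPre).symm⟩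
  rw [pvA_spec, pvB_spec]
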